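-- pv_equiv track=rewrite | github.com/suddensleep/automata | src/dfa.py | power_set_to_new_ind
-- ===== SOURCE A (Python) =====
-- def power_set_to_new_ind(nfa_state_subset, nfa_size):
--     bin_str = ''
--     for state in range(nfa_size):
--         if state in nfa_state_subset:
--             bin_str += "1"
--         else:
--             bin_str += "0"
--     return int(bin_str, 2)
-- ===== SOURCE B (Python) =====
-- def power_set_to_new_ind(nfa_state_subset, nfa_size):
--     mask = 0
--     for state in set(nfa_state_subset):
--         if 0 <= state < nfa_size:
--             mask += 1 << (nfa_size - 1 - state)
--     return mask
-- ===== Notes on version B (the rewrite author's own statement) =====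
-- stated objective: alternative
-- what changed: Instead of scanning every state in range(nfa_size), testing membership and building a binary string that is then parsed by int(.,2), B sets the bit 2^(nfa_size-1-state) directly for each distinct subset member that lies in range, in one pass over the subset; it trades A's C-level list scans for a Python-level loop over the set, so it is not measurably faster.
import Mathlib
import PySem

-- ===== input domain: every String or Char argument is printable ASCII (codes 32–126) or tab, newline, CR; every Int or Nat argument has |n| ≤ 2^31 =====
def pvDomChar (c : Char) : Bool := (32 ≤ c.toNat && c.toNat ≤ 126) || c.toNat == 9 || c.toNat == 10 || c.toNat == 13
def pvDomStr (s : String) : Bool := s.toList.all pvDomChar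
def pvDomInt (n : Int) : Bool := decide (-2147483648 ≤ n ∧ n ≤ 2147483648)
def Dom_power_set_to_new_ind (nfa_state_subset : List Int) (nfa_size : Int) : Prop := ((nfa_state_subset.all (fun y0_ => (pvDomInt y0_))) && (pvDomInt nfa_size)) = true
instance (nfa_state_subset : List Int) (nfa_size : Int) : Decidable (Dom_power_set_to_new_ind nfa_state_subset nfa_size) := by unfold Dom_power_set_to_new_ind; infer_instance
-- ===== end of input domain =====

-- B changes the algorithm: it sets each subset member's bit directly, in one pass over the
-- subset, instead of scanning all states and parsing a binary string (objective: alternative).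

-- ===== PORT A =====
-- Hand port of int(s, 2), exact for the strings A ever builds: nonempty strings over
-- {'0','1'} (and none on the empty string = ValueError).  A's bin_str never contains the
-- whitespace / sign / '0b' prefix / '_' forms that Python's int additionally accepts, so
-- this step-for-step digit fold is exact on A's domain.
def pvIntOfBinChars? (cs : List Char) : Option Int :=
  match cs with
  | [] => none
  | _ => some (cs.foldl (fun a c => 2 * a + (if c = '1' then 1 else 0)) 0)

def power_set_to_new_ind (nfa_state_subset : List Int) (nfa_size : Int) : Int :=
  -- bin_str = ''; for state in range(nfa_size): bin_str += "1" if state in subset else "0"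
  let bin_str : List Char :=
    (PySem.List.pyRange 0 nfa_size 1).foldl
      (fun bs state => if state ∈ nfa_state_subset then bs ++ ['1'] else bs ++ ['0']) []
  -- return int(bin_str, 2)   (none = ValueError on nfa_size ≤ 0, excluded by Pre_)
  (pvIntOfBinChars? bin_str).getD 0

-- ===== PORT B =====
def power_set_to_new_ind_alt (nfa_state_subset : List Int) (nfa_size : Int) : Int :=
  -- mask = 0; for state in set(subset): if 0 <= state < size: mask += 1 << (size - 1 - state)
  -- (1 << k) is 2 ^ k; the exponent is ≥ 0 whenever the guard holds, so toNat is exact.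
  (PySem.Set.ofList nfa_state_subset).foldl
    (fun mask state =>
      if 0 ≤ state ∧ state < nfa_size then mask + 2 ^ (nfa_size - 1 - state).toNat else mask) 0

-- ===== PRECONDITION & SPEC =====
-- Pre_ excludes exactly nfa_size ≤ 0, where Python A raises ValueError (int('', 2)).
def Pre_power_set_to_new_ind (nfa_state_subset : List Int) (nfa_size : Int) : Prop :=
  1 ≤ nfa_size
instance (nfa_state_subset : List Int) (nfa_size : Int) : Decidable (Pre_power_set_to_new_ind nfa_state_subset nfa_size) := by unfold Pre_power_set_to_new_ind; infer_instance
def pvWitness_power_set_to_new_ind : List Int × Int := ([0, 2], 3)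

def Spec_power_set_to_new_ind (nfa_state_subset : List Int) (nfa_size : Int) (out : Int) : Prop := out = power_set_to_new_ind_alt nfa_state_subset nfa_size
instance (nfa_state_subset : List Int) (nfa_size : Int) (out : Int) : Decidable (Spec_power_set_to_new_ind nfa_state_subset nfa_size out) := by unfold Spec_power_set_to_new_ind; infer_instance

-- ===== CLAIM (what is proved, stated in full; the proofs are below) =====
def Claim_equal_power_set_to_new_ind : Prop := ∀ (nfa_state_subset : List Int) (nfa_size : Int), Dom_power_set_to_new_ind nfa_state_subset nfa_size → Pre_power_set_to_new_ind nfa_state_subset nfa_size → Spec_power_set_to_new_ind nfa_state_subset nfa_size (power_set_to_new_ind nfa_state_subset nfa_size)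

-- ===== LEMMAS AND PROOFS =====

lemma pvSumIndicator (a : Int) (L : List Int) (hnd : L.Nodup) :
    (L.map (fun d => if d = a then (1:Int) else 0)).sum = if a ∈ L then 1 else 0 := by
  induction L with
  | nil => simp
  | cons d t ih =>
    have hnd' := (List.nodup_cons.mp hnd)
    rw [List.map_cons, List.sum_cons, ih hnd'.2]
    by_cases hda : d = a
    · subst hda
      rw [if_pos rfl, if_neg hnd'.1, if_pos (List.mem_cons_self)]
      ring
    · rw [if_neg hda]
      have hmem2 : (a ∈ d :: t) ↔ (a ∈ t) := by
        constructor
        · intro h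
          rcases List.mem_cons.mp h with h1 | h2
          · exact absurd h1.symm hda
          · exact h2
        · exact fun h => List.mem_cons_of_mem d h
      by_cases hat : a ∈ t
      · rw [if_pos hat, if_pos (hmem2.mpr hat)]; ring
      · rw [if_neg hat, if_neg (fun h => hat (hmem2.mp h))]; ring

-- the bit weight state d contributes for automaton size n
def pvW (subset : List Int) (n d : Int) : Int :=
  if 0 ≤ d ∧ d < n then 2 ^ ((n - 1 - d).toNat) else 0

lemma pvB_eq_sum (subset : List Int) (n : Int) :
    power_set_to_new_ind_alt subset n
      = ((PySem.Set.ofList subset).map (pvW subset n)).sum := by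
  unfold power_set_to_new_ind_alt
  rw [PySem.List.foldl_congr_mem _ _ (fun mask s => mask + pvW subset n s) 0
        (by intro acc x _; simp only [pvW]; split_ifs <;> simp)]
  rw [PySem.List.foldl_add, zero_add]

lemma pvIntOfBinChars?_of_ne_nil (cs : List Char) (h : cs ≠ []) :
    pvIntOfBinChars? cs = some (cs.foldl (fun a c => 2 * a + (if c = '1' then 1 else 0)) 0) := by
  cases cs with
  | nil => exact absurd rfl h
  | cons c t => rfl

lemma pvA_eq_fold (subset : List Int) (n : Int) (hn : 1 ≤ n) :
    power_set_to_new_ind subset n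
      = (PySem.List.pyRange 0 n 1).foldl
          (fun a s => 2 * a + (if s ∈ subset then 1 else 0)) 0 := by
  unfold power_set_to_new_ind
  rw [PySem.List.foldl_congr_mem _ _
        (fun bs s => bs ++ [if s ∈ subset then '1' else '0']) []
        (by intro acc x _; split_ifs with h <;> simp [h])]
  rw [PySem.List.foldl_append_singleton_eq_map, List.nil_append]
  show (pvIntOfBinChars? ((PySem.List.pyRange 0 n).map
        (fun s => if s ∈ subset then '1' else '0'))).getD 0 = _
  rw [pvIntOfBinChars?_of_ne_nil _
        (by rw [PySem.List.pyRange_one_cons (by omega : (0:Int) < n)]; simp)]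
  rw [Option.getD_some, List.foldl_map]
  exact PySem.List.foldl_congr_mem _ _ _ _
    (by intro acc x _; split_ifs <;> first | rfl | (exfalso; simp_all))

lemma pvCore (subset : List Int) (L : List Int) (hnd : L.Nodup)
    (hmem : ∀ d : Int, d ∈ L ↔ d ∈ subset) (m : Nat) :
    (PySem.List.pyRange 0 (m : Int) 1).foldl
        (fun a s => 2 * a + (if s ∈ subset then 1 else 0)) 0
      = (L.map (pvW subset (m : Int))).sum := by
  induction m with
  | zero =>
    rw [PySem.List.pyRange_one_eq_nil (by omega)]
    refine (List.sum_eq_zero ?_).symm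
    intro x hx
    obtain ⟨d, _, rfl⟩ := List.mem_map.mp hx
    simp only [pvW]
    split_ifs with h
    · omega
    · rfl
  | succ m ih =>
    have hc : ((m + 1 : Nat) : Int) = (m : Int) + 1 := by push_cast; ring
    rw [hc, PySem.List.pyRange_one_succ_right (by omega : (0:Int) ≤ (m:Int)),
        List.foldl_append]
    simp only [List.foldl_cons, List.foldl_nil]
    rw [ih]
    have hptw : ∀ d : Int,
        pvW subset ((m : Int) + 1) d
          = 2 * pvW subset (m : Int) d + (if d = (m : Int) then 1 else 0) := by
      intro d
      simp only [pvW]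
      by_cases hd : d = (m : Int)
      · subst hd
        rw [if_pos (by omega), if_neg (by omega), if_pos rfl]
        norm_num
      · by_cases hr : 0 ≤ d ∧ d < (m : Int)
        · rw [if_pos (by omega), if_pos hr, if_neg hd]
          have he : ((m : Int) + 1 - 1 - d).toNat = ((m : Int) - 1 - d).toNat + 1 := by omega
          rw [he, pow_succ]
          ring
        · rw [if_neg (by omega), if_neg hr, if_neg hd]; ring
    calc 2 * (L.map (pvW subset (m : Int))).sum + (if (m : Int) ∈ subset then 1 else 0)
        = 2 * (L.map (pvW subset (m : Int))).sum + (if (m : Int) ∈ L then 1 else 0) := by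
          simp only [← hmem]
      _ = (L.map (fun d => 2 * pvW subset (m : Int) d)).sum
            + (L.map (fun d => if d = (m : Int) then 1 else 0)).sum := by
          rw [List.sum_map_mul_left, pvSumIndicator (m : Int) L hnd]
      _ = (L.map (pvW subset ((m : Int) + 1))).sum := by
          rw [← PySem.List.sum_map_add_int]
          exact (List.map_congr_left (fun d _ => hptw d)).symm ▸ rfl

-- ===== VERDICT (by name: the statement is the Claim_ definition above) =====
theorem power_set_to_new_ind_spec : Claim_equal_power_set_to_new_ind := by
  intro subset n _ hn
  unfold Pre_power_set_to_new_ind at hn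
  unfold Spec_power_set_to_new_ind
  have h0 : 0 ≤ n := by omega
  have hcast : ((n.toNat : Int)) = n := Int.toNat_of_nonneg h0
  rw [pvA_eq_fold subset n hn, pvB_eq_sum subset n, ← hcast]
  exact pvCore subset _ (PySem.Set.nodup_ofList _)
    (fun d => PySem.Set.mem_ofList _ d) n.toNat
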